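-- pv_equiv track=rewrite | github.com/AlexCheng7/Password_Encoder_Decoder | PasswordEncoderDecoder/my_module/decode.py | custom_decode
-- ===== SOURCE A (Python) =====
-- def custom_decode(encoded_password, custom_key,
--                     custom_increment, custom_multiplier):
--     """ Decodes the custom encoded string
--
--     Parameters
--     ----------
--     encoded_password: string
--         String to decode
--     custom_key
--         User input start key
--     custom_increment
--         User input key increment
--     custom_multiplier
--         User input key increment multiplier
--
--     Returns
--     -------
--     custom_decoded : string
--         Returns the decoded string
--     """
--
--     # Initalizes variables
--     key = custom_key
--     key_increment = custom_increment
--     key = key + (len(encoded_password) * (key_increment * custom_multiplier))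
--     custom_decoded = ''
--
--     # Iterates and decodes each character backwards and decreases the key
--     for char in encoded_password[::-1]:
--         # Key is decreased by increment multiplier
--         key = key - (key_increment * custom_multiplier)
--         custom_decoded = custom_decoded + chr(ord(char) - key)
--
--     # Having decoded backwards, flips the message back around
--     custom_decoded = custom_decoded[::-1]
--
--     return custom_decoded
-- ===== SOURCE B (Python) =====
-- def custom_decode(encoded_password, custom_key,
--                     custom_increment, custom_multiplier):
--     """Forward single pass: the key for the character at index i is
--     custom_key + i * step (closed form), no reversals, no running key."""
--     step = custom_increment * custom_multiplier
--     return ''.join(chr(ord(char) - (custom_key + i * step))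
--                    for i, char in enumerate(encoded_password))
-- ===== Notes on version B (the rewrite author's own statement) =====
-- stated objective: simpler
-- what changed: Replaces A's double string reversal and mutable decreasing key accumulator with a single forward pass that computes each character's key by the closed form custom_key + i*step and joins the pieces once.
import Mathlib
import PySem

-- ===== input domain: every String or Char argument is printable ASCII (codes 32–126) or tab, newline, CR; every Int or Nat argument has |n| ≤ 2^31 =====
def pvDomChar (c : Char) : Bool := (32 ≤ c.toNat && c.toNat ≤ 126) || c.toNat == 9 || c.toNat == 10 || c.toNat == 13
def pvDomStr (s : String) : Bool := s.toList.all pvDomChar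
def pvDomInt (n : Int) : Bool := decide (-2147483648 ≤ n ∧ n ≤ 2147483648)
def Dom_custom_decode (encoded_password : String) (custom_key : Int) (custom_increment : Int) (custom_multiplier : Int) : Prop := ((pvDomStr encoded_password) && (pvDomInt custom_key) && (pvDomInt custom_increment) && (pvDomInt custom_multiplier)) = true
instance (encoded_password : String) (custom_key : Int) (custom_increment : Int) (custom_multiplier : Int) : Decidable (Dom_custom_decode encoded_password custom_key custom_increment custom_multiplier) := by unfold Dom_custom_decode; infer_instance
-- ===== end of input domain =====

-- B replaces A's double reversal and running decreasing key with one forward pass using the closed-form key custom_key + i*step (objective: simpler).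


-- ===== PORT A =====
-- chr(v): exact for 0 ≤ v ≤ 0x10FFFF outside the surrogate range 0xD800–0xDFFF (Pre_ guarantees this)
def pyChr (v : Int) : Char := Char.ofNat v.toNat

def custom_decode (encoded_password : String) (custom_key : Int) (custom_increment : Int) (custom_multiplier : Int) : String :=
  let key_increment := custom_increment
  let key := custom_key + ((encoded_password.toList.length : Int) * (key_increment * custom_multiplier))
  -- for char in encoded_password[::-1]: key -= inc*mult; custom_decoded += chr(ord(char) - key)
  let st := encoded_password.toList.reverse.foldl
    (fun (st : List Char × Int) ch =>
      let key := st.2 - (key_increment * custom_multiplier)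
      (st.1 ++ [pyChr ((ch.toNat : Int) - key)], key))
    (([] : List Char), key)
  String.mk st.1.reverse

-- ===== PORT B =====
def custom_decode_alt (encoded_password : String) (custom_key : Int) (custom_increment : Int) (custom_multiplier : Int) : String :=
  let step := custom_increment * custom_multiplier
  String.mk ((PySem.List.enumerate encoded_password.toList).map
    (fun p => pyChr ((p.2.toNat : Int) - (custom_key + p.1 * step))))

-- ===== PRECONDITION & SPEC =====
-- Pre_ excludes exactly the inputs where chr's argument ord(c)-key_i is out of range (Python raises ValueError)
-- or is a surrogate codepoint 0xD800–0xDFFF, where Python chr returns a one-char str that a Lean Char cannot represent.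
def Pre_custom_decode (encoded_password : String) (custom_key : Int) (custom_increment : Int) (custom_multiplier : Int) : Prop :=
  ∀ i (h : i < encoded_password.toList.length),
    0 ≤ ((encoded_password.toList[i].toNat : Int)) - (custom_key + (i : Int) * (custom_increment * custom_multiplier)) ∧
    ((encoded_password.toList[i].toNat : Int)) - (custom_key + (i : Int) * (custom_increment * custom_multiplier)) ≤ 1114111 ∧
    (((encoded_password.toList[i].toNat : Int)) - (custom_key + (i : Int) * (custom_increment * custom_multiplier)) < 55296 ∨
     57343 < ((encoded_password.toList[i].toNat : Int)) - (custom_key + (i : Int) * (custom_increment * custom_multiplier)))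
instance (encoded_password : String) (custom_key : Int) (custom_increment : Int) (custom_multiplier : Int) : Decidable (Pre_custom_decode encoded_password custom_key custom_increment custom_multiplier) := by unfold Pre_custom_decode; infer_instance

def pvWitness_custom_decode : String × Int × Int × Int := ("khoor", 2, 1, 0)

def Spec_custom_decode (encoded_password : String) (custom_key : Int) (custom_increment : Int) (custom_multiplier : Int) (out : String) : Prop := out = custom_decode_alt encoded_password custom_key custom_increment custom_multiplier
instance (encoded_password : String) (custom_key : Int) (custom_increment : Int) (custom_multiplier : Int) (out : String) : Decidable (Spec_custom_decode encoded_password custom_key custom_increment custom_multiplier out) := by unfold Spec_custom_decode; infer_instance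

-- ===== CLAIM (what is proved, stated in full; the proofs are below) =====
def Claim_equal_custom_decode : Prop := ∀ (encoded_password : String) (custom_key : Int) (custom_increment : Int) (custom_multiplier : Int), Dom_custom_decode encoded_password custom_key custom_increment custom_multiplier → Pre_custom_decode encoded_password custom_key custom_increment custom_multiplier → Spec_custom_decode encoded_password custom_key custom_increment custom_multiplier (custom_decode encoded_password custom_key custom_increment custom_multiplier)

-- ===== LEMMAS AND PROOFS =====

-- A's backward loop, characterised: after folding l with start key `key`,
-- the accumulated list is acc followed by the chars decoded with keys key-(i+1)*step.
lemma foldA_char (step : Int) (l acc : List Char) (key : Int) :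
    (l.foldl
      (fun (st : List Char × Int) ch =>
        (st.1 ++ [pyChr ((ch.toNat : Int) - (st.2 - step))], st.2 - step))
      (acc, key)).1
    = acc ++ l.mapIdx (fun i ch => pyChr ((ch.toNat : Int) - (key - ((i : Int) + 1) * step))) := by
  induction l generalizing acc key with
  | nil => simp
  | cons ch t ih =>
    simp only [List.foldl_cons, List.mapIdx_cons]
    rw [ih]
    simp only [List.append_assoc, List.singleton_append]
    congr 2
    · congr 1; push_cast; ring
    · refine congrFun (congrArg List.mapIdx ?_) t
      funext i c; congr 1; push_cast; ring

lemma decode_eq_alt (s : String) (k inc mult : Int) :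
    custom_decode s k inc mult = custom_decode_alt s k inc mult := by
  unfold custom_decode custom_decode_alt
  simp only []
  set l := s.toList with hl
  set step := inc * mult with hstep
  have hA := foldA_char step l.reverse []
      (k + ((l.length : Int) * step))
  apply congrArg String.mk
  rw [hA]
  simp only [List.nil_append]
  apply List.ext_getElem
  · simp [PySem.List.length_enumerate]
  · intro j h1 h2
    have hn : j < l.length := by simpa using h2
    rw [List.getElem_reverse]
    rw [List.getElem_mapIdx]
    rw [List.getElem_map, PySem.List.getElem_enumerate]
    simp only [List.length_mapIdx, List.length_reverse, List.getElem_reverse]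
    have hidx : l.length - 1 - (l.length - 1 - j) = j := by omega
    simp only [hidx]
    congr 1
    have hc : ((l.length - 1 - j : Nat) : Int) = (l.length : Int) - 1 - (j : Int) := by omega
    rw [hc]
    ring

-- ===== VERDICT (by name: the statement is the Claim_ definition above) =====
theorem custom_decode_spec : Claim_equal_custom_decode := by
  intro s k inc mult _ _
  unfold Spec_custom_decode
  exact decode_eq_alt s k inc mult
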